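-- pv_equiv track=rewrite | github.com/Pummelchen/FXAI | FXAI/Tools/offline_lab/newspulse_fusion.py | _sorted_recent_items
-- ===== SOURCE A (Python) =====
-- from typing import Any
--
-- def _sorted_recent_items(config: dict[str, Any], items: list[dict[str, Any]]) -> list[dict[str, Any]]:
--     limit = int(config.get("history_recent_limit", 80) or 80)
--     deduped: dict[str, dict[str, Any]] = {}
--     for item in items:
--         item_id = str(item.get("id", ""))
--         if not item_id:
--             continue
--         current = deduped.get(item_id)
--         if current is None or str(item.get("seen_at", "")) > str(current.get("seen_at", "")):
--             deduped[item_id] = dict(item)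
--     return sorted(
--         deduped.values(),
--         key=lambda row: (str(row.get("published_at", "")), str(row.get("id", ""))),
--         reverse=True,
--     )[:limit]
-- ===== SOURCE B (Python) =====
-- from typing import Any
--
-- def _sorted_recent_items(config: dict[str, Any], items: list[dict[str, Any]]) -> list[dict[str, Any]]:
--     limit = int(config.get("history_recent_limit", 80) or 80)
--     ids = dict.fromkeys(i for i in (str(it.get("id", "")) for it in items) if i)
--     winners = [
--         dict(max((it for it in items if str(it.get("id", "")) == i),
--                  key=lambda it: str(it.get("seen_at", ""))))
--         for i in ids
--     ]
--     winners.sort(key=lambda row: (str(row.get("published_at", "")), str(row.get("id", ""))),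
--                  reverse=True)
--     return winners[:limit]
-- ===== Notes on version B (the rewrite author's own statement) =====
-- stated objective: alternative
-- what changed: Removes A's running best-so-far dict entirely: B first collects the distinct non-empty ids in order (dict.fromkeys), then for each id picks its winner with max(key=seen_at) over a filtered scan of items (max's first-winner rule matches A's strict-> replacement), then sorts and slices as A does.
import Mathlib
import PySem

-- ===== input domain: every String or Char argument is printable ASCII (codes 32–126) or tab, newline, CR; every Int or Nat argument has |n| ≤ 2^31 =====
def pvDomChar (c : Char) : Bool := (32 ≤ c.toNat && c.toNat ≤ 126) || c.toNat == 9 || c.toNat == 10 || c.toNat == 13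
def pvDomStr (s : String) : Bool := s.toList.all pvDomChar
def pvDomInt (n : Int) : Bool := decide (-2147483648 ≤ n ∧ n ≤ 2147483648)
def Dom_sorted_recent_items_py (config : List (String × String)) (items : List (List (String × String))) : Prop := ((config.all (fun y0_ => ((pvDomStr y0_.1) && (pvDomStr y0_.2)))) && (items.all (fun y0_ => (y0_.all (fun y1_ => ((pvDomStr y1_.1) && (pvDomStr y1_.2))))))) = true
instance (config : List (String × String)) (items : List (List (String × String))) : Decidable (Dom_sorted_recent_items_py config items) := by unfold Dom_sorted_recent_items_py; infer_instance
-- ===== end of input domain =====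

-- B drops A's running best-so-far dict: distinct ids first (ordered dedup), then per-id winner by max(key=seen_at) over a filtered scan; same results, no speed claim.

-- ===== PORT A =====
-- limit = int(config.get("history_recent_limit", 80) or 80); the (PySem.Int.ofStr? s).getD 0
-- default is only reached outside Pre_ (unparseable non-empty value, where Python raises ValueError).
def pvLimit (config : List (String × String)) : Int :=
  let s := (PySem.Dict.ofList config).getD "history_recent_limit" ""
  if s = "" then 80 else (PySem.Int.ofStr? s).getD 0

def sorted_recent_items_py (config : List (String × String)) (items : List (List (String × String))) : List (List (String × String)) :=
  let limit := pvLimit config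
  let deduped : PySem.Dict String (PySem.Dict String String) :=
    items.foldl (fun d item =>
      let it := PySem.Dict.ofList item
      let itemId := it.getD "id" ""
      if itemId = "" then d
      else
        match d.get? itemId with
        | none => d.insert itemId it
        | some current =>
            if current.getD "seen_at" "" < it.getD "seen_at" "" then d.insert itemId it else d)
      PySem.Dict.empty
  (PySem.List.slice
    (PySem.List.sorted2 deduped.values
      (fun row => row.getD "published_at" "") (fun row => row.getD "id" "") true)
    none (some limit)).map PySem.Dict.items

-- ===== PORT B =====
def sorted_recent_items_py_alt (config : List (String × String)) (items : List (List (String × String))) : List (List (String × String)) :=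
  let limit := pvLimit config
  let ids : List String :=
    PySem.List.dedup ((items.map (fun it => (PySem.Dict.ofList it).getD "id" "")).filter (fun i => i != ""))
  let winners : List (PySem.Dict String String) :=
    ids.map (fun i =>
      match PySem.List.max? ((items.map PySem.Dict.ofList).filter (fun it => it.getD "id" "" == i))
          (fun it => it.getD "seen_at" "") with
      | some m => m
      | none => PySem.Dict.empty)
  (PySem.List.slice
    (PySem.List.sorted2 winners
      (fun row => row.getD "published_at" "") (fun row => row.getD "id" "") true)
    none (some limit)).map PySem.Dict.items

-- ===== PRECONDITION & SPEC =====
-- Pre_ excludes only configs whose non-empty "history_recent_limit" value does not parse as an int: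
-- there Python's int(...) raises ValueError.
def Pre_sorted_recent_items_py (config : List (String × String)) (items : List (List (String × String))) : Prop :=
  (PySem.Dict.ofList config).getD "history_recent_limit" "" = "" ∨
  (PySem.Int.ofStr? ((PySem.Dict.ofList config).getD "history_recent_limit" "")).isSome = true
instance (config : List (String × String)) (items : List (List (String × String))) : Decidable (Pre_sorted_recent_items_py config items) := by unfold Pre_sorted_recent_items_py; infer_instance

def pvWitness_sorted_recent_items_py : (List (String × String)) × (List (List (String × String))) :=
  ([("history_recent_limit", "2")], [[("id", "a"), ("seen_at", "1")], [("id", "a"), ("seen_at", "2")], [("id", "b")]])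

def Spec_sorted_recent_items_py (config : List (String × String)) (items : List (List (String × String))) (out : List (List (String × String))) : Prop := out = sorted_recent_items_py_alt config items
instance (config : List (String × String)) (items : List (List (String × String))) (out : List (List (String × String))) : Decidable (Spec_sorted_recent_items_py config items out) := by unfold Spec_sorted_recent_items_py; infer_instance

-- ===== CLAIM (what is proved, stated in full; the proofs are below) =====
def Claim_equal_sorted_recent_items_py : Prop := ∀ (config : List (String × String)) (items : List (List (String × String))), Dom_sorted_recent_items_py config items → Pre_sorted_recent_items_py config items → Spec_sorted_recent_items_py config items (sorted_recent_items_py config items)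

-- ===== LEMMAS AND PROOFS =====

-- proof-side names: A's loop step and loop, B's three ingredients
def pvStepA (d : PySem.Dict String (PySem.Dict String String)) (it : PySem.Dict String String) : PySem.Dict String (PySem.Dict String String) :=
  if it.getD "id" "" = "" then d
  else
    match d.get? (it.getD "id" "") with
    | none => d.insert (it.getD "id" "") it
    | some current =>
        if current.getD "seen_at" "" < it.getD "seen_at" "" then d.insert (it.getD "id" "") it else d

def pvFoldA (vs : List (PySem.Dict String String)) : PySem.Dict String (PySem.Dict String String) :=
  vs.foldl pvStepA PySem.Dict.empty

def pvIds (vs : List (PySem.Dict String String)) : List String :=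
  PySem.List.dedup ((vs.map (fun it => it.getD "id" "")).filter (fun i => i != ""))

def pvBest (l : List (PySem.Dict String String)) : PySem.Dict String String :=
  match PySem.List.max? l (fun it => it.getD "seen_at" "") with
  | some m => m
  | none => PySem.Dict.empty

def pvWin (vs : List (PySem.Dict String String)) (i : String) : PySem.Dict String String :=
  pvBest (vs.filter (fun it => it.getD "id" "" == i))

lemma pvBest_append (l : List (PySem.Dict String String)) (v : PySem.Dict String String) (hl : l ≠ []) :
    pvBest (l ++ [v]) = if (pvBest l).getD "seen_at" "" < v.getD "seen_at" "" then v else pvBest l := by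
  cases hm : PySem.List.max? l (fun it => it.getD "seen_at" "") with
  | none => exact absurd ((PySem.List.max?_eq_none_iff l _).mp hm) hl
  | some m =>
    have hbl : pvBest l = m := by simp [pvBest, hm]
    have h1 : PySem.List.max? (l ++ [v]) (fun it => it.getD "seen_at" "") =
        if m.getD "seen_at" "" < v.getD "seen_at" "" then some v else some m := by
      unfold PySem.List.max? at hm ⊢
      rw [List.foldl_append, hm]
      simp [List.foldl]
    rw [hbl]
    by_cases hlt : m.getD "seen_at" "" < v.getD "seen_at" "" <;>
      simp [pvBest, h1, hlt]

lemma pv_mem_ids (vs : List (PySem.Dict String String)) (i : String) :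
    i ∈ pvIds vs ↔ (∃ it ∈ vs, it.getD "id" "" = i) ∧ i ≠ "" := by
  rw [pvIds, PySem.List.mem_dedup, List.mem_filter]
  simp only [List.mem_map, ne_eq, bne_iff_ne]

lemma pv_win_append_ne (vs : List (PySem.Dict String String)) (v : PySem.Dict String String)
    (i : String) (hne : ¬ v.getD "id" "" = i) : pvWin (vs ++ [v]) i = pvWin vs i := by
  simp [pvWin, List.filter_append, hne]

lemma pv_items (vs : List (PySem.Dict String String)) :
    (pvFoldA vs).items = (pvIds vs).map (fun i => (i, pvWin vs i)) := by
  induction vs using List.reverseRecOn with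
  | nil => rfl
  | append_singleton vs v ih =>
    have hA : pvFoldA (vs ++ [v]) = pvStepA (pvFoldA vs) v := by
      simp [pvFoldA, List.foldl_append]
    set d := pvFoldA vs with hd
    have hkeys : d.keys = pvIds vs := by
      simp only [PySem.Dict.keys, ih, List.map_map]
      exact List.map_id'' (fun i => rfl) _
    have hnd : d.keys.Nodup := by rw [hkeys]; exact PySem.List.nodup_dedup _
    rw [hA]
    by_cases hid : v.getD "id" "" = ""
    · -- empty id: nothing changes
      have hids : pvIds (vs ++ [v]) = pvIds vs := by
        simp [pvIds, List.filter_append, hid]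
      have hstep : pvStepA d v = d := by unfold pvStepA; rw [if_pos hid]
      rw [hstep, ih, hids]
      apply List.map_congr_left
      intro i hi
      have hi' : i ≠ "" := ((pv_mem_ids vs i).mp hi).2
      rw [pv_win_append_ne vs v i (by rw [hid]; exact fun h => hi' h.symm)]
    · -- non-empty id
      have hids : pvIds (vs ++ [v]) = PySem.Set.add (pvIds vs) (v.getD "id" "") := by
        simp only [pvIds, List.map_append, List.map_cons, List.map_nil, List.filter_append,
          PySem.List.dedup_eq_ofList]
        rw [show ([v.getD "id" ""].filter (fun i => i != "")) = [v.getD "id" ""] by simp [hid]]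
        exact PySem.Set.ofList_append_singleton _ _
      by_cases hmem : v.getD "id" "" ∈ pvIds vs
      · -- existing id
        have hids' : pvIds (vs ++ [v]) = pvIds vs := by
          rw [hids, PySem.Set.add_of_mem hmem]
        have hcur : d.get? (v.getD "id" "") = some (pvWin vs (v.getD "id" "")) :=
          PySem.Dict.get?_of_mem_items d
            (by rw [ih]; exact List.mem_map.mpr ⟨_, hmem, rfl⟩) hnd
        have hcontains : d.contains (v.getD "id" "") = true := by
          rw [PySem.Dict.contains_eq_isSome_get?, hcur]; rfl
        have hfilne : vs.filter (fun it => it.getD "id" "" == v.getD "id" "") ≠ [] := by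
          obtain ⟨⟨it, hit, hide⟩, -⟩ := (pv_mem_ids vs _).mp hmem
          intro hnil
          have : it ∈ vs.filter (fun it => it.getD "id" "" == v.getD "id" "") :=
            List.mem_filter.mpr ⟨hit, by simp [hide]⟩
          rw [hnil] at this; exact absurd this (List.not_mem_nil)
        have hwinv : pvWin (vs ++ [v]) (v.getD "id" "") =
            if (pvWin vs (v.getD "id" "")).getD "seen_at" "" < v.getD "seen_at" ""
            then v else pvWin vs (v.getD "id" "") := by
          simp only [pvWin, List.filter_append]
          rw [show ([v].filter (fun it => it.getD "id" "" == v.getD "id" "")) = [v] by simp]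
          exact pvBest_append _ v hfilne
        by_cases hlt : (pvWin vs (v.getD "id" "")).getD "seen_at" "" < v.getD "seen_at" ""
        · have hstep : pvStepA d v = d.insert (v.getD "id" "") v := by
            simp [pvStepA, hid, hcur, hlt]
          rw [hstep, PySem.Dict.items_insert_of_contains d v hcontains, ih, hids',
            List.map_map]
          apply List.map_congr_left
          intro i hi
          by_cases hie : i = v.getD "id" ""
          · subst hie
            simp [Function.comp, hwinv, hlt]
          · have : ¬ v.getD "id" "" = i := fun h => hie h.symm
            simp [Function.comp, pv_win_append_ne vs v i this,
              fun h => hie (by exact h)]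
        · have hstep : pvStepA d v = d := by
            simp [pvStepA, hid, hcur, hlt]
          rw [hstep, ih, hids']
          apply List.map_congr_left
          intro i hi
          by_cases hie : i = v.getD "id" ""
          · subst hie; rw [hwinv, if_neg hlt]
          · rw [pv_win_append_ne vs v i (fun h => hie h.symm)]
      · -- fresh id
        have hids' : pvIds (vs ++ [v]) = pvIds vs ++ [v.getD "id" ""] := by
          rw [hids, PySem.Set.add_of_not_mem hmem]
        have hcur : d.get? (v.getD "id" "") = none := by
          rw [PySem.Dict.get?_eq_none_iff_not_mem_keys, hkeys]; exact hmem
        have hcontains : d.contains (v.getD "id" "") = false := by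
          rw [PySem.Dict.contains_eq_isSome_get?, hcur]; rfl
        have hstep : pvStepA d v = d.insert (v.getD "id" "") v := by
          simp [pvStepA, hid, hcur]
        have hfil : vs.filter (fun it => it.getD "id" "" == v.getD "id" "") = [] := by
          rw [List.filter_eq_nil_iff]
          intro it hit hbe
          exact hmem ((pv_mem_ids vs _).mpr ⟨⟨it, hit, by simpa using hbe⟩, hid⟩)
        have hwinv : pvWin (vs ++ [v]) (v.getD "id" "") = v := by
          simp only [pvWin, List.filter_append, hfil, List.nil_append]
          rw [show ([v].filter (fun it => it.getD "id" "" == v.getD "id" "")) = [v] by simp]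
          rfl
        rw [hstep, PySem.Dict.items_insert_of_not_contains d v hcontains, ih, hids',
          List.map_append]
        congr 1
        · apply List.map_congr_left
          intro i hi
          have hne : ¬ v.getD "id" "" = i := by
            intro h; exact hmem (h ▸ hi)
          rw [pv_win_append_ne vs v i hne]
        · simp [hwinv]

lemma pv_values (vs : List (PySem.Dict String String)) :
    (pvFoldA vs).values = (pvIds vs).map (pvWin vs) := by
  have h := pv_items vs
  simp only [PySem.Dict.values, h, List.map_map]
  rfl

-- ===== VERDICT (by name: the statement is the Claim_ definition above) =====
theorem sorted_recent_items_py_spec : Claim_equal_sorted_recent_items_py := by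
  intro config items _ _
  unfold Spec_sorted_recent_items_py sorted_recent_items_py sorted_recent_items_py_alt
  have hA : (items.foldl
      (fun d item =>
        let it := PySem.Dict.ofList item
        let itemId := it.getD "id" ""
        if itemId = "" then d
        else
          match d.get? itemId with
          | none => d.insert itemId it
          | some current =>
              if current.getD "seen_at" "" < it.getD "seen_at" "" then d.insert itemId it else d)
      PySem.Dict.empty) = pvFoldA (items.map PySem.Dict.ofList) := by
    rw [pvFoldA, List.foldl_map]; rfl
  have hIds : PySem.List.dedup ((items.map (fun it => (PySem.Dict.ofList it).getD "id" "")).filter (fun i => i != ""))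
      = pvIds (items.map PySem.Dict.ofList) := by
    rw [pvIds, List.map_map]; rfl
  simp only [hA, hIds, pv_values]
  congr 2
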